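-- pv_equiv track=rewrite | github.com/diffix/coronaVirus | contact-tracing-demo/maps/proxOpenstreetmapAPI.py | processTagsAgainstPlaces
-- ===== SOURCE A (Python) =====
-- places = {
--     # 'home': ['building apartments','building bungalow',
--     #          'building dormitory','building	house','building residential',
--     #          'building static_caravan', 'addr:housenumber *'],
--     'school': ['amenity	college','amenity kindergarten','amenity language_school','amenity music_school',
--                'amenity school','amenity university','building kindergarten','building school','building university'],
--     'office': ['amenity	bank','amenity clinic','amenity	dentist','amenity doctors','amenity	pharmacy','amenity	veterinary',
--                'amenity	police','amenity post_office','building	office','office	*'],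
--     'sport': ['building	grandstand','building pavilion','building riding_hall','building sports_hall','building	stadium',
--               'leisure stadium','leisure sports_centre','leisure swimming_pool','sport *'],
--     'super': ['building	supermarket', 'shop supermarket'],
--     'store': ['building	retail','shop *'],
--     'restaurant': ['amenity	bar','amenity bbq','amenity	biergarten','amenity biergarten','amenity cafe',
--                    'amenity	fast_food','amenity	food_court','amenity pub','amenity restaurant',]
-- }
--
-- def processTagsAgainstPlaces(__tags2):
--     for __place_type3, __place_tags3 in sorted(places.items(),key=lambda x: x[0], reverse=True):
--         for t in __place_tags3:
--             __k = t.split()[0]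
--             __v = t.split()[1]
--             __node_tags = []
--             if __v == '*':
--                 __node_tags.extend([tag for tag in __tags2 if tag.get('k') == __k])
--             else:
--                 __node_tags.extend([tag for tag in __tags2 if tag.get('k') == __k and tag.get('v') == __v])
--             if len(__node_tags) > 0:
--                 return True, __place_type3
--     return False, ''
-- ===== SOURCE B (Python) =====
-- places = {
--     'school': ['amenity	college','amenity kindergarten','amenity language_school','amenity music_school',
--                'amenity school','amenity university','building kindergarten','building school','building university'],
--     'office': ['amenity	bank','amenity clinic','amenity	dentist','amenity doctors','amenity	pharmacy','amenity	veterinary',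
--                'amenity	police','amenity post_office','building	office','office	*'],
--     'sport': ['building	grandstand','building pavilion','building riding_hall','building sports_hall','building	stadium',
--               'leisure stadium','leisure sports_centre','leisure swimming_pool','sport *'],
--     'super': ['building	supermarket', 'shop supermarket'],
--     'store': ['building	retail','shop *'],
--     'restaurant': ['amenity	bar','amenity bbq','amenity	biergarten','amenity biergarten','amenity cafe',
--                    'amenity	fast_food','amenity	food_court','amenity pub','amenity restaurant',]
-- }
--
-- # Reverse indexes, built once: exact (k, v) pattern -> alphabetically largest place
-- # declaring it, and wildcard key k (from 'k *') -> largest place declaring it.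
-- _EXACT = {}
-- _WILD = {}
-- for _p, _pats in places.items():
--     for _t in _pats:
--         _k, _v = _t.split()
--         if _v == '*':
--             if _k not in _WILD or _p > _WILD[_k]:
--                 _WILD[_k] = _p
--         else:
--             if (_k, _v) not in _EXACT or _p > _EXACT[(_k, _v)]:
--                 _EXACT[(_k, _v)] = _p
--
-- def processTagsAgainstPlaces(__tags2):
--     # Single pass over the tags, keeping the largest matching place type
--     # (A's reverse-sorted first hit is exactly the alphabetical maximum).
--     best = None
--     for tag in __tags2:
--         k = tag.get('k')
--         v = tag.get('v')
--         for cand in (_EXACT.get((k, v)), _WILD.get(k)):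
--             if cand is not None and (best is None or cand > best):
--                 best = cand
--     if best is None:
--         return False, ''
--     return True, best
-- ===== Notes on version B (the rewrite author's own statement) =====
-- stated objective: alternative
-- what changed: Replaces the pattern-outer double loop (44 patterns, each filtering the whole tag list, in reverse-sorted place order) by two reverse indexes built once from the patterns ((k,v)->place and wildcard k->place) and a single pass over the tags keeping the running alphabetical maximum of the looked-up candidate place types.
import Mathlib
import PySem

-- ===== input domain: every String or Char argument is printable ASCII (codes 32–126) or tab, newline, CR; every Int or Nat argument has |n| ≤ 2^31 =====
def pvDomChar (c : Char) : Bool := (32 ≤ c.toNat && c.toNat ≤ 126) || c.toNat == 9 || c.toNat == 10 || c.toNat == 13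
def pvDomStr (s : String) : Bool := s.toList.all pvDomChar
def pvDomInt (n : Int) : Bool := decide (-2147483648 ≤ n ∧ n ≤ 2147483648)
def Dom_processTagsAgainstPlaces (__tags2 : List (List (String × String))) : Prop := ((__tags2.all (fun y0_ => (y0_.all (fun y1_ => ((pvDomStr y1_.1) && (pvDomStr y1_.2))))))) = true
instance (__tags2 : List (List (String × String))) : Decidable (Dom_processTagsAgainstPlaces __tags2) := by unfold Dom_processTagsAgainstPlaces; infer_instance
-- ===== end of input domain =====

-- B replaces A's pattern-outer double loop (reverse-sorted places, each pattern filtering the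
-- whole tag list) by two reverse indexes built once from the patterns and ONE pass over the
-- tags keeping the running alphabetical maximum of the looked-up candidate place types.

-- ===== PORT A =====
def pvPlaces : List (String × List String) := [
  ("school", ["amenity\tcollege","amenity kindergarten","amenity language_school","amenity music_school",
              "amenity school","amenity university","building kindergarten","building school","building university"]),
  ("office", ["amenity\tbank","amenity clinic","amenity\tdentist","amenity doctors","amenity\tpharmacy","amenity\tveterinary",
              "amenity\tpolice","amenity post_office","building\toffice","office\t*"]),
  ("sport", ["building\tgrandstand","building pavilion","building riding_hall","building sports_hall","building\tstadium",
             "leisure stadium","leisure sports_centre","leisure swimming_pool","sport *"]),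
  ("super", ["building\tsupermarket", "shop supermarket"]),
  ("store", ["building\tretail","shop *"]),
  ("restaurant", ["amenity\tbar","amenity bbq","amenity\tbiergarten","amenity biergarten","amenity cafe",
                  "amenity\tfast_food","amenity\tfood_court","amenity pub","amenity restaurant"])]

-- inner 'for t in __place_tags3' loop of A (early return = some)
def pvPatsA (tags : List (List (String × String))) (place : String) : List String → Option (Bool × String)
  | [] => none
  | t :: rest =>
    let __k := PySem.List.pyGetD (PySem.Str.split₀ t) 0 ""   -- t.split()[0]; the default is never reached (patterns are two-word literals)
    let __v := PySem.List.pyGetD (PySem.Str.split₀ t) 1 ""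
    let __node_tags : List (List (String × String)) :=
      if __v == "*" then
        tags.filter (fun tag => (PySem.Dict.mk tag).get? "k" == some __k)
      else
        tags.filter (fun tag => (PySem.Dict.mk tag).get? "k" == some __k && (PySem.Dict.mk tag).get? "v" == some __v)
    if 0 < __node_tags.length then some (true, place) else pvPatsA tags place rest

-- outer 'for __place_type3, __place_tags3 in sorted(...)' loop of A
def pvLoopA (tags : List (List (String × String))) : List (String × List String) → Bool × String
  | [] => (false, "")
  | pp :: rest =>
    match pvPatsA tags pp.1 pp.2 with
    | some r => r
    | none => pvLoopA tags rest

def processTagsAgainstPlaces (__tags2 : List (List (String × String))) : Bool × String :=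
  pvLoopA __tags2 (PySem.List.sorted pvPlaces (fun x => x.1) true)

-- ===== PORT B =====
-- the two reverse indexes of Source B, built once from pvPlaces (Python str keys embedded as `some`)
def pvIdxB : PySem.Dict (Option String × Option String) String × PySem.Dict (Option String) String :=
  pvPlaces.foldl (fun acc pp =>
    pp.2.foldl (fun acc t =>
      let _k := PySem.List.pyGetD (PySem.Str.split₀ t) 0 ""
      let _v := PySem.List.pyGetD (PySem.Str.split₀ t) 1 ""
      if _v == "*" then
        (acc.1,
         if (match acc.2.get? (some _k) with | none => true | some q => PySem.Chars.strLt q.toList pp.1.toList) then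
           acc.2.insert (some _k) pp.1 else acc.2)
      else
        (if (match acc.1.get? (some _k, some _v) with | none => true | some q => PySem.Chars.strLt q.toList pp.1.toList) then
           acc.1.insert (some _k, some _v) pp.1 else acc.1,
         acc.2)) acc)
    (PySem.Dict.empty, PySem.Dict.empty)

def processTagsAgainstPlaces_alt (__tags2 : List (List (String × String))) : Bool × String :=
  let best := __tags2.foldl (fun best tag =>
    let k := (PySem.Dict.mk tag).get? "k"
    let v := (PySem.Dict.mk tag).get? "v"
    [pvIdxB.1.get? (k, v), pvIdxB.2.get? k].foldl
      (fun best cand =>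
        match cand with
        | some c =>
          match best with
          | none => some c
          | some b => if PySem.Chars.strLt b.toList c.toList then some c else best
        | none => best)
      best) none
  match best with
  | none => (false, "")
  | some b => (true, b)

-- ===== PRECONDITION & SPEC =====
def Spec_processTagsAgainstPlaces (__tags2 : List (List (String × String))) (out : Bool × String) : Prop := out = processTagsAgainstPlaces_alt __tags2
instance (__tags2 : List (List (String × String))) (out : Bool × String) : Decidable (Spec_processTagsAgainstPlaces __tags2 out) := by unfold Spec_processTagsAgainstPlaces; infer_instance

-- ===== CLAIM (what is proved, stated in full; the proofs are below) =====
def Claim_equal_processTagsAgainstPlaces : Prop := ∀ (__tags2 : List (List (String × String))), Dom_processTagsAgainstPlaces __tags2 → Spec_processTagsAgainstPlaces __tags2 (processTagsAgainstPlaces __tags2)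

-- ===== LEMMAS AND PROOFS =====

-- parsed (key, value) of one pattern string
def pvParse (t : String) : String × String :=
  (PySem.List.pyGetD (PySem.Str.split₀ t) 0 "", PySem.List.pyGetD (PySem.Str.split₀ t) 1 "")

-- does one parsed pattern match one tag dict?
def pvTagMatch (kv : String × String) (tag : List (String × String)) : Bool :=
  if kv.2 == "*" then (PySem.Dict.mk tag).get? "k" == some kv.1
  else ((PySem.Dict.mk tag).get? "k" == some kv.1 && (PySem.Dict.mk tag).get? "v" == some kv.2)

-- A's per-place hit condition
def pvHitA (pats : List String) (tags : List (List (String × String))) : Bool :=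
  pats.any (fun t => tags.any (pvTagMatch (pvParse t)))

-- B's running-max step over the flattened candidate stream
def pvStep (b : Option String) (c : String) : Option String :=
  match b with
  | none => some c
  | some b0 => if PySem.Chars.strLt b0.toList c.toList then some c else some b0

def pvMax (S : List String) : Option String := S.foldl pvStep none

-- all candidate place types B ever sees, in B's visit order
def pvCands (tags : List (List (String × String))) : List String :=
  tags.flatMap (fun tag =>
    (pvIdxB.1.get? ((PySem.Dict.mk tag).get? "k", (PySem.Dict.mk tag).get? "v")).toList ++
    (pvIdxB.2.get? ((PySem.Dict.mk tag).get? "k")).toList)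

-- the concrete reverse-sorted place list A iterates over
def pvSortedPlaces : List (String × List String) := [
  ("super", ["building\tsupermarket", "shop supermarket"]),
  ("store", ["building\tretail","shop *"]),
  ("sport", ["building\tgrandstand","building pavilion","building riding_hall","building sports_hall","building\tstadium",
             "leisure stadium","leisure sports_centre","leisure swimming_pool","sport *"]),
  ("school", ["amenity\tcollege","amenity kindergarten","amenity language_school","amenity music_school",
              "amenity school","amenity university","building kindergarten","building school","building university"]),
  ("restaurant", ["amenity\tbar","amenity bbq","amenity\tbiergarten","amenity biergarten","amenity cafe",
                  "amenity\tfast_food","amenity\tfood_court","amenity pub","amenity restaurant"]),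
  ("office", ["amenity\tbank","amenity clinic","amenity\tdentist","amenity doctors","amenity\tpharmacy","amenity\tveterinary",
              "amenity\tpolice","amenity post_office","building\toffice","office\t*"])]

set_option maxRecDepth 40000 in
set_option maxHeartbeats 2000000 in
lemma pvSorted_eval : PySem.List.sorted pvPlaces (fun x => x.1) true = pvSortedPlaces := by
  apply PySem.List.sorted_rev_eq_of_perm_of_pairwise_gt
  · decide
  · simp [String.lt_iff_toList_lt]
    decide

lemma pvStrLt_iff (s t : String) : PySem.Chars.strLt s.toList t.toList = true ↔ s < t := by
  simp [PySem.Chars.strLt, ← String.lt_iff_toList_lt]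

lemma pvFilter_pos {α : Type} (l : List α) (p : α → Bool) :
    (0 < (l.filter p).length) ↔ l.any p = true := by
  rw [List.length_pos_iff]
  simp [Ne, List.filter_eq_nil_iff, List.any_eq_true, not_forall]

lemma pvPatsA_eq (tags : List (List (String × String))) (place : String) (pats : List String) :
    pvPatsA tags place pats =
      if pvHitA pats tags then some (true, place) else none := by
  induction pats with
  | nil => simp [pvPatsA, pvHitA]
  | cons t rest ih =>
    rw [pvPatsA]
    have hnode : (if (PySem.List.pyGetD (PySem.Str.split₀ t) 1 "" == "*") = true then
          tags.filter (fun tag => (PySem.Dict.mk tag).get? "k" == some (PySem.List.pyGetD (PySem.Str.split₀ t) 0 ""))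
        else
          tags.filter (fun tag => ((PySem.Dict.mk tag).get? "k" == some (PySem.List.pyGetD (PySem.Str.split₀ t) 0 "") && (PySem.Dict.mk tag).get? "v" == some (PySem.List.pyGetD (PySem.Str.split₀ t) 1 ""))))
        = tags.filter (pvTagMatch (pvParse t)) := by
      cases hv : (PySem.List.pyGetD (PySem.Str.split₀ t) 1 "" == "*") with
      | true => exact List.filter_congr (fun tag _ => by simp [pvTagMatch, pvParse, hv])
      | false => exact List.filter_congr (fun tag _ => by simp [pvTagMatch, pvParse, hv])
    rw [hnode,
        show pvHitA (t :: rest) tags = (tags.any (pvTagMatch (pvParse t)) || pvHitA rest tags) from by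
          simp [pvHitA]]
    cases h1 : tags.any (pvTagMatch (pvParse t)) with
    | true => rw [if_pos ((pvFilter_pos _ _).mpr h1)]; simp
    | false =>
      rw [if_neg (by rw [pvFilter_pos]; simp [h1]), ih]
      simp

lemma pvStep_some : ∀ (S : List String) (b : String), ∃ m, S.foldl pvStep (some b) = some m
  | [], b => ⟨b, rfl⟩
  | c :: S, b => by
    simp only [List.foldl_cons, pvStep]
    split
    · exact pvStep_some S c
    · exact pvStep_some S b

lemma pvFold_bounds : ∀ (S : List String) (init : Option String) (m : String),
    S.foldl pvStep init = some m →
    (∀ x ∈ S, x ≤ m) ∧ (∀ b, init = some b → b ≤ m) ∧ (init = some m ∨ m ∈ S)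
  | [], init, m, h => by
    simp only [List.foldl_nil] at h
    refine ⟨by simp, ?_, Or.inl h⟩
    intro b hb; rw [h] at hb; exact le_of_eq (Option.some.inj hb).symm
  | c :: S, init, m, h => by
    simp only [List.foldl_cons] at h
    obtain ⟨hub, hinit, hmem⟩ := pvFold_bounds S (pvStep init c) m h
    have hc : c ≤ m := by
      cases init with
      | none => exact hinit c rfl
      | some b0 =>
        by_cases hlt : PySem.Chars.strLt b0.toList c.toList = true
        · exact hinit c (by simp [pvStep, hlt])
        · have hb0 : b0 ≤ m := hinit b0 (by simp [pvStep, hlt])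
          have : ¬ b0 < c := fun hh => hlt ((pvStrLt_iff b0 c).mpr hh)
          exact le_trans (le_of_not_gt (fun hh => this hh)) hb0
    refine ⟨?_, ?_, ?_⟩
    · intro x hx
      rcases List.mem_cons.mp hx with rfl | hx
      · exact hc
      · exact hub x hx
    · intro b hb
      subst hb
      by_cases hlt : PySem.Chars.strLt b.toList c.toList = true
      · exact le_trans (le_of_lt ((pvStrLt_iff b c).mp hlt)) hc
      · exact hinit b (by simp [pvStep, hlt])
    · rcases hmem with hstep | hmem
      · cases init with
        | none =>
          simp only [pvStep] at hstep
          exact Or.inr (List.mem_cons.mpr (Or.inl (Option.some.inj hstep).symm))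
        | some b0 =>
          by_cases hlt : PySem.Chars.strLt b0.toList c.toList = true
          · rw [show pvStep (some b0) c = some c from by simp [pvStep, hlt]] at hstep
            exact Or.inr (List.mem_cons.mpr (Or.inl (Option.some.inj hstep).symm))
          · rw [show pvStep (some b0) c = some b0 from by simp [pvStep, hlt]] at hstep
            exact Or.inl hstep
      · exact Or.inr (List.mem_cons.mpr (Or.inr hmem))

lemma pvMax_eq_some (S : List String) (m : String) (hm : m ∈ S) (hub : ∀ x ∈ S, x ≤ m) :
    pvMax S = some m := by
  cases S with
  | nil => simp at hm
  | cons c S =>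
    obtain ⟨m', hm'⟩ := pvStep_some S c
    have hfold : (c :: S).foldl pvStep none = some m' := by
      simpa [pvMax, pvStep] using hm'
    obtain ⟨hub', hinit', hmem'⟩ := pvFold_bounds S (some c) m' hm'
    have hm'mem : m' ∈ c :: S := by
      rcases hmem' with h | h
      · exact List.mem_cons.mpr (Or.inl (Option.some.inj h).symm)
      · exact List.mem_cons.mpr (Or.inr h)
    have h1 : m' ≤ m := hub m' hm'mem
    have h2 : m ≤ m' := by
      rcases List.mem_cons.mp hm with rfl | h
      · exact hinit' m rfl
      · exact hub' m h
    rw [pvMax, hfold, le_antisymm h1 h2]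

-- A's outer loop over a strictly descending place list returns the maximum of any
-- candidate set S consistent with the per-place hit conditions.
lemma pvLoop_eq_max (tags : List (List (String × String))) :
    ∀ (L : List (String × List String)), L.Pairwise (fun a b => b.1 < a.1) →
    ∀ (S : List String), (∀ x ∈ S, x ∈ L.map Prod.fst) →
    (∀ pp ∈ L, (pvHitA pp.2 tags = true ↔ pp.1 ∈ S)) →
    pvLoopA tags L = (match pvMax S with | none => (false, "") | some m => (true, m)) := by
  intro L
  induction L with
  | nil =>
    intro _ S hS _
    have : S = [] := List.eq_nil_iff_forall_not_mem.mpr (fun x hx => by simpa using hS x hx)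
    subst this
    rfl
  | cons pp rest ih =>
    intro hpw S hS hiff
    rw [pvLoopA, pvPatsA_eq]
    by_cases h : pvHitA pp.2 tags = true
    · have hp : pp.1 ∈ S := (hiff pp List.mem_cons_self).mp h
      have hub : ∀ x ∈ S, x ≤ pp.1 := by
        intro x hx
        rcases List.mem_map.mp (hS x hx) with ⟨y, hy, rfl⟩
        rcases List.mem_cons.mp hy with rfl | hy
        · exact le_refl _
        · exact le_of_lt ((List.pairwise_cons.mp hpw).1 y hy)
      rw [pvMax_eq_some S pp.1 hp hub]
      simp [h]
    · have hnp : pp.1 ∉ S := fun hx => h ((hiff pp List.mem_cons_self).mpr hx)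
      have hS' : ∀ x ∈ S, x ∈ rest.map Prod.fst := by
        intro x hx
        rcases List.mem_cons.mp (hS x hx) with heq | hmem
        · exact absurd (heq ▸ hx) hnp
        · exact hmem
      simp only [h, if_false]
      simpa [h] using ih (List.pairwise_cons.mp hpw).2 S hS' (fun q hq => hiff q (List.mem_cons.mpr (Or.inr hq)))

lemma pvInner2 (o1 o2 b : Option String) :
    [o1, o2].foldl
      (fun best cand =>
        match cand with
        | some c =>
          match best with
          | none => some c
          | some b => if PySem.Chars.strLt b.toList c.toList then some c else best
        | none => best) b
    = (o1.toList ++ o2.toList).foldl pvStep b := by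
  have h : ∀ (b : Option String) (c : String),
      (fun (best : Option String) (cand : Option String) =>
        match cand with
        | some c =>
          match best with
          | none => some c
          | some b => if PySem.Chars.strLt b.toList c.toList then some c else best
        | none => best) b (some c) = pvStep b c := by
    intro b c; cases b <;> rfl
  cases o1 with
  | none =>
    cases o2 with
    | none => rfl
    | some y => simp only [List.foldl_cons, List.foldl_nil, h]; rfl
  | some x =>
    cases o2 with
    | none => simp only [List.foldl_cons, List.foldl_nil, h]; rfl
    | some y => simp only [List.foldl_cons, List.foldl_nil, h]; rfl

-- B unfolds to the running maximum of the candidate stream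
lemma pvAlt_eq (tags : List (List (String × String))) :
    processTagsAgainstPlaces_alt tags =
      (match pvMax (pvCands tags) with | none => (false, "") | some m => (true, m)) := by
  have key : ∀ (ts : List (List (String × String))) (init : Option String),
      ts.foldl (fun best tag =>
        [pvIdxB.1.get? ((PySem.Dict.mk tag).get? "k", (PySem.Dict.mk tag).get? "v"),
         pvIdxB.2.get? ((PySem.Dict.mk tag).get? "k")].foldl
          (fun best cand =>
            match cand with
            | some c =>
              match best with
              | none => some c
              | some b => if PySem.Chars.strLt b.toList c.toList then some c else best
            | none => best) best) init
      = (pvCands ts).foldl pvStep init := by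
    intro ts
    induction ts with
    | nil => intro init; rfl
    | cons tag rest ih =>
      intro init
      rw [List.foldl_cons, ih, pvInner2]
      conv_rhs => rw [show pvCands (tag :: rest) =
            ((pvIdxB.1.get? ((PySem.Dict.mk tag).get? "k", (PySem.Dict.mk tag).get? "v")).toList ++
             (pvIdxB.2.get? ((PySem.Dict.mk tag).get? "k")).toList) ++ pvCands rest from rfl,
          List.foldl_append]
  rw [processTagsAgainstPlaces_alt]
  simp only [key tags none]
  rfl

set_option maxRecDepth 40000 in
set_option maxHeartbeats 2000000 in
lemma pvExact_items : pvIdxB.1.items = [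
  ((some "amenity", some "college"), "school"), ((some "amenity", some "kindergarten"), "school"),
  ((some "amenity", some "language_school"), "school"), ((some "amenity", some "music_school"), "school"),
  ((some "amenity", some "school"), "school"), ((some "amenity", some "university"), "school"),
  ((some "building", some "kindergarten"), "school"), ((some "building", some "school"), "school"),
  ((some "building", some "university"), "school"), ((some "amenity", some "bank"), "office"),
  ((some "amenity", some "clinic"), "office"), ((some "amenity", some "dentist"), "office"),
  ((some "amenity", some "doctors"), "office"), ((some "amenity", some "pharmacy"), "office"),
  ((some "amenity", some "veterinary"), "office"), ((some "amenity", some "police"), "office"),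
  ((some "amenity", some "post_office"), "office"), ((some "building", some "office"), "office"),
  ((some "building", some "grandstand"), "sport"), ((some "building", some "pavilion"), "sport"),
  ((some "building", some "riding_hall"), "sport"), ((some "building", some "sports_hall"), "sport"),
  ((some "building", some "stadium"), "sport"), ((some "leisure", some "stadium"), "sport"),
  ((some "leisure", some "sports_centre"), "sport"), ((some "leisure", some "swimming_pool"), "sport"),
  ((some "building", some "supermarket"), "super"), ((some "shop", some "supermarket"), "super"),
  ((some "building", some "retail"), "store"), ((some "amenity", some "bar"), "restaurant"),
  ((some "amenity", some "bbq"), "restaurant"), ((some "amenity", some "biergarten"), "restaurant"),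
  ((some "amenity", some "cafe"), "restaurant"), ((some "amenity", some "fast_food"), "restaurant"),
  ((some "amenity", some "food_court"), "restaurant"), ((some "amenity", some "pub"), "restaurant"),
  ((some "amenity", some "restaurant"), "restaurant")] := by decide

set_option maxRecDepth 40000 in
set_option maxHeartbeats 2000000 in
lemma pvWild_items : pvIdxB.2.items =
    [(some "office", "office"), (some "sport", "sport"), (some "shop", "store")] := by decide

set_option maxRecDepth 40000 in
set_option maxHeartbeats 2000000 in
lemma pvExact_nodup : pvIdxB.1.keys.Nodup := by decide

set_option maxRecDepth 40000 in
set_option maxHeartbeats 2000000 in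
lemma pvWild_nodup : pvIdxB.2.keys.Nodup := by decide

lemma pvCands_mem_iff (tags : List (List (String × String))) (p : String) :
    p ∈ pvCands tags ↔ ∃ tag ∈ tags,
      (pvIdxB.1.get? ((PySem.Dict.mk tag).get? "k", (PySem.Dict.mk tag).get? "v") = some p ∨
       pvIdxB.2.get? ((PySem.Dict.mk tag).get? "k") = some p) := by
  simp [pvCands, List.mem_flatMap, Option.mem_toList]

set_option maxRecDepth 16384 in
set_option maxHeartbeats 2000000 in
lemma pvCands_mem (tags : List (List (String × String))) (x : String) (hx : x ∈ pvCands tags) :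
    x ∈ pvSortedPlaces.map Prod.fst := by
  rcases (pvCands_mem_iff tags x).mp hx with ⟨tag, _, h | h⟩
  · have hm := PySem.Dict.mem_items_of_get?_eq_some _ h
    rw [pvExact_items] at hm
    have := List.mem_map_of_mem (f := Prod.snd) hm
    simp only [pvSortedPlaces, List.map_cons, List.map_nil]
    simp at this ⊢ <;> tauto
  · have hm := PySem.Dict.mem_items_of_get?_eq_some _ h
    rw [pvWild_items] at hm
    have := List.mem_map_of_mem (f := Prod.snd) hm
    simp only [pvSortedPlaces, List.map_cons, List.map_nil]
    simp at this ⊢ <;> tauto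

lemma pvExists_map {α β : Type} (l : List α) (f : α → β) (P : β → Prop) :
    (∃ t ∈ l, P (f t)) ↔ ∃ kv ∈ l.map f, P kv := by
  simp [List.mem_map]

set_option maxRecDepth 40000 in
set_option maxHeartbeats 1000000 in
lemma pvPerTag_super (tag : List (String × String)) :
    (∃ t ∈ (["building\tsupermarket", "shop supermarket"] : List String), pvTagMatch (pvParse t) tag = true) ↔
    (pvIdxB.1.get? ((PySem.Dict.mk tag).get? "k", (PySem.Dict.mk tag).get? "v") = some "super" ∨
     pvIdxB.2.get? ((PySem.Dict.mk tag).get? "k") = some "super") := by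
  rw [pvExists_map (["building\tsupermarket", "shop supermarket"] : List String) pvParse (fun kv => pvTagMatch kv tag = true)]
  rw [show (["building\tsupermarket", "shop supermarket"] : List String).map pvParse = [("building", "supermarket"), ("shop", "supermarket")] from by decide]
  rw [PySem.Dict.get?_eq_some_iff_mem_items _ _ _ pvExact_nodup,
      PySem.Dict.get?_eq_some_iff_mem_items _ _ _ pvWild_nodup, pvExact_items, pvWild_items]
  simp [pvTagMatch, Prod.ext_iff]
  constructor
  · rintro ⟨kx, vx, (⟨rfl,rfl⟩|⟨rfl,rfl⟩), hm⟩ <;> (try simp at hm) <;> tauto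
  · rintro (⟨h1,h2⟩|⟨h1,h2⟩)
    exacts [⟨"building", "supermarket", by simp, by simp [h1, h2]⟩, ⟨"shop", "supermarket", by simp, by simp [h1, h2]⟩]

set_option maxRecDepth 40000 in
set_option maxHeartbeats 1000000 in
lemma pvPerTag_store (tag : List (String × String)) :
    (∃ t ∈ (["building\tretail", "shop *"] : List String), pvTagMatch (pvParse t) tag = true) ↔
    (pvIdxB.1.get? ((PySem.Dict.mk tag).get? "k", (PySem.Dict.mk tag).get? "v") = some "store" ∨
     pvIdxB.2.get? ((PySem.Dict.mk tag).get? "k") = some "store") := by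
  rw [pvExists_map (["building\tretail", "shop *"] : List String) pvParse (fun kv => pvTagMatch kv tag = true)]
  rw [show (["building\tretail", "shop *"] : List String).map pvParse = [("building", "retail"), ("shop", "*")] from by decide]
  rw [PySem.Dict.get?_eq_some_iff_mem_items _ _ _ pvExact_nodup,
      PySem.Dict.get?_eq_some_iff_mem_items _ _ _ pvWild_nodup, pvExact_items, pvWild_items]
  simp [pvTagMatch, Prod.ext_iff]
  constructor
  · rintro ⟨kx, vx, (⟨rfl,rfl⟩|⟨rfl,rfl⟩), hm⟩ <;> (try simp at hm) <;> tauto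
  · rintro ((⟨h1,h2⟩)|hk)
    exacts [⟨"building", "retail", by simp, by simp [h1, h2]⟩, ⟨"shop", "*", by simp, by simp [hk]⟩]

set_option maxRecDepth 40000 in
set_option maxHeartbeats 1000000 in
lemma pvPerTag_sport (tag : List (String × String)) :
    (∃ t ∈ (["building\tgrandstand", "building pavilion", "building riding_hall", "building sports_hall", "building\tstadium", "leisure stadium", "leisure sports_centre", "leisure swimming_pool", "sport *"] : List String), pvTagMatch (pvParse t) tag = true) ↔
    (pvIdxB.1.get? ((PySem.Dict.mk tag).get? "k", (PySem.Dict.mk tag).get? "v") = some "sport" ∨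
     pvIdxB.2.get? ((PySem.Dict.mk tag).get? "k") = some "sport") := by
  rw [pvExists_map (["building\tgrandstand", "building pavilion", "building riding_hall", "building sports_hall", "building\tstadium", "leisure stadium", "leisure sports_centre", "leisure swimming_pool", "sport *"] : List String) pvParse (fun kv => pvTagMatch kv tag = true)]
  rw [show (["building\tgrandstand", "building pavilion", "building riding_hall", "building sports_hall", "building\tstadium", "leisure stadium", "leisure sports_centre", "leisure swimming_pool", "sport *"] : List String).map pvParse = [("building", "grandstand"), ("building", "pavilion"), ("building", "riding_hall"), ("building", "sports_hall"), ("building", "stadium"), ("leisure", "stadium"), ("leisure", "sports_centre"), ("leisure", "swimming_pool"), ("sport", "*")] from by decide]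
  rw [PySem.Dict.get?_eq_some_iff_mem_items _ _ _ pvExact_nodup,
      PySem.Dict.get?_eq_some_iff_mem_items _ _ _ pvWild_nodup, pvExact_items, pvWild_items]
  simp [pvTagMatch, Prod.ext_iff]
  constructor
  · rintro ⟨kx, vx, (⟨rfl,rfl⟩|⟨rfl,rfl⟩|⟨rfl,rfl⟩|⟨rfl,rfl⟩|⟨rfl,rfl⟩|⟨rfl,rfl⟩|⟨rfl,rfl⟩|⟨rfl,rfl⟩|⟨rfl,rfl⟩), hm⟩ <;> (try simp at hm) <;> tauto
  · rintro ((⟨h1,h2⟩|⟨h1,h2⟩|⟨h1,h2⟩|⟨h1,h2⟩|⟨h1,h2⟩|⟨h1,h2⟩|⟨h1,h2⟩|⟨h1,h2⟩)|hk)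
    exacts [⟨"building", "grandstand", by simp, by simp [h1, h2]⟩, ⟨"building", "pavilion", by simp, by simp [h1, h2]⟩, ⟨"building", "riding_hall", by simp, by simp [h1, h2]⟩, ⟨"building", "sports_hall", by simp, by simp [h1, h2]⟩, ⟨"building", "stadium", by simp, by simp [h1, h2]⟩, ⟨"leisure", "stadium", by simp, by simp [h1, h2]⟩, ⟨"leisure", "sports_centre", by simp, by simp [h1, h2]⟩, ⟨"leisure", "swimming_pool", by simp, by simp [h1, h2]⟩, ⟨"sport", "*", by simp, by simp [hk]⟩]

set_option maxRecDepth 40000 in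
set_option maxHeartbeats 1000000 in
lemma pvPerTag_school (tag : List (String × String)) :
    (∃ t ∈ (["amenity\tcollege", "amenity kindergarten", "amenity language_school", "amenity music_school", "amenity school", "amenity university", "building kindergarten", "building school", "building university"] : List String), pvTagMatch (pvParse t) tag = true) ↔
    (pvIdxB.1.get? ((PySem.Dict.mk tag).get? "k", (PySem.Dict.mk tag).get? "v") = some "school" ∨
     pvIdxB.2.get? ((PySem.Dict.mk tag).get? "k") = some "school") := by
  rw [pvExists_map (["amenity\tcollege", "amenity kindergarten", "amenity language_school", "amenity music_school", "amenity school", "amenity university", "building kindergarten", "building school", "building university"] : List String) pvParse (fun kv => pvTagMatch kv tag = true)]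
  rw [show (["amenity\tcollege", "amenity kindergarten", "amenity language_school", "amenity music_school", "amenity school", "amenity university", "building kindergarten", "building school", "building university"] : List String).map pvParse = [("amenity", "college"), ("amenity", "kindergarten"), ("amenity", "language_school"), ("amenity", "music_school"), ("amenity", "school"), ("amenity", "university"), ("building", "kindergarten"), ("building", "school"), ("building", "university")] from by decide]
  rw [PySem.Dict.get?_eq_some_iff_mem_items _ _ _ pvExact_nodup,
      PySem.Dict.get?_eq_some_iff_mem_items _ _ _ pvWild_nodup, pvExact_items, pvWild_items]
  simp [pvTagMatch, Prod.ext_iff]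
  constructor
  · rintro ⟨kx, vx, (⟨rfl,rfl⟩|⟨rfl,rfl⟩|⟨rfl,rfl⟩|⟨rfl,rfl⟩|⟨rfl,rfl⟩|⟨rfl,rfl⟩|⟨rfl,rfl⟩|⟨rfl,rfl⟩|⟨rfl,rfl⟩), hm⟩ <;> (try simp at hm) <;> tauto
  · rintro (⟨h1,h2⟩|⟨h1,h2⟩|⟨h1,h2⟩|⟨h1,h2⟩|⟨h1,h2⟩|⟨h1,h2⟩|⟨h1,h2⟩|⟨h1,h2⟩|⟨h1,h2⟩)
    exacts [⟨"amenity", "college", by simp, by simp [h1, h2]⟩, ⟨"amenity", "kindergarten", by simp, by simp [h1, h2]⟩, ⟨"amenity", "language_school", by simp, by simp [h1, h2]⟩, ⟨"amenity", "music_school", by simp, by simp [h1, h2]⟩, ⟨"amenity", "school", by simp, by simp [h1, h2]⟩, ⟨"amenity", "university", by simp, by simp [h1, h2]⟩, ⟨"building", "kindergarten", by simp, by simp [h1, h2]⟩, ⟨"building", "school", by simp, by simp [h1, h2]⟩, ⟨"building", "university", by simp, by simp [h1, h2]⟩]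

set_option maxRecDepth 40000 in
set_option maxHeartbeats 1000000 in
lemma pvPerTag_restaurant (tag : List (String × String)) :
    (∃ t ∈ (["amenity\tbar", "amenity bbq", "amenity\tbiergarten", "amenity biergarten", "amenity cafe", "amenity\tfast_food", "amenity\tfood_court", "amenity pub", "amenity restaurant"] : List String), pvTagMatch (pvParse t) tag = true) ↔
    (pvIdxB.1.get? ((PySem.Dict.mk tag).get? "k", (PySem.Dict.mk tag).get? "v") = some "restaurant" ∨
     pvIdxB.2.get? ((PySem.Dict.mk tag).get? "k") = some "restaurant") := by
  rw [pvExists_map (["amenity\tbar", "amenity bbq", "amenity\tbiergarten", "amenity biergarten", "amenity cafe", "amenity\tfast_food", "amenity\tfood_court", "amenity pub", "amenity restaurant"] : List String) pvParse (fun kv => pvTagMatch kv tag = true)]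
  rw [show (["amenity\tbar", "amenity bbq", "amenity\tbiergarten", "amenity biergarten", "amenity cafe", "amenity\tfast_food", "amenity\tfood_court", "amenity pub", "amenity restaurant"] : List String).map pvParse = [("amenity", "bar"), ("amenity", "bbq"), ("amenity", "biergarten"), ("amenity", "biergarten"), ("amenity", "cafe"), ("amenity", "fast_food"), ("amenity", "food_court"), ("amenity", "pub"), ("amenity", "restaurant")] from by decide]
  rw [PySem.Dict.get?_eq_some_iff_mem_items _ _ _ pvExact_nodup,
      PySem.Dict.get?_eq_some_iff_mem_items _ _ _ pvWild_nodup, pvExact_items, pvWild_items]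
  simp [pvTagMatch, Prod.ext_iff]
  constructor
  · rintro ⟨kx, vx, (⟨rfl,rfl⟩|⟨rfl,rfl⟩|⟨rfl,rfl⟩|⟨rfl,rfl⟩|⟨rfl,rfl⟩|⟨rfl,rfl⟩|⟨rfl,rfl⟩|⟨rfl,rfl⟩), hm⟩ <;> (try simp at hm) <;> tauto
  · rintro (⟨h1,h2⟩|⟨h1,h2⟩|⟨h1,h2⟩|⟨h1,h2⟩|⟨h1,h2⟩|⟨h1,h2⟩|⟨h1,h2⟩|⟨h1,h2⟩)
    exacts [⟨"amenity", "bar", by simp, by simp [h1, h2]⟩, ⟨"amenity", "bbq", by simp, by simp [h1, h2]⟩, ⟨"amenity", "biergarten", by simp, by simp [h1, h2]⟩, ⟨"amenity", "cafe", by simp, by simp [h1, h2]⟩, ⟨"amenity", "fast_food", by simp, by simp [h1, h2]⟩, ⟨"amenity", "food_court", by simp, by simp [h1, h2]⟩, ⟨"amenity", "pub", by simp, by simp [h1, h2]⟩, ⟨"amenity", "restaurant", by simp, by simp [h1, h2]⟩]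

set_option maxRecDepth 40000 in
set_option maxHeartbeats 1000000 in
lemma pvPerTag_office (tag : List (String × String)) :
    (∃ t ∈ (["amenity\tbank", "amenity clinic", "amenity\tdentist", "amenity doctors", "amenity\tpharmacy", "amenity\tveterinary", "amenity\tpolice", "amenity post_office", "building\toffice", "office\t*"] : List String), pvTagMatch (pvParse t) tag = true) ↔
    (pvIdxB.1.get? ((PySem.Dict.mk tag).get? "k", (PySem.Dict.mk tag).get? "v") = some "office" ∨
     pvIdxB.2.get? ((PySem.Dict.mk tag).get? "k") = some "office") := by
  rw [pvExists_map (["amenity\tbank", "amenity clinic", "amenity\tdentist", "amenity doctors", "amenity\tpharmacy", "amenity\tveterinary", "amenity\tpolice", "amenity post_office", "building\toffice", "office\t*"] : List String) pvParse (fun kv => pvTagMatch kv tag = true)]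
  rw [show (["amenity\tbank", "amenity clinic", "amenity\tdentist", "amenity doctors", "amenity\tpharmacy", "amenity\tveterinary", "amenity\tpolice", "amenity post_office", "building\toffice", "office\t*"] : List String).map pvParse = [("amenity", "bank"), ("amenity", "clinic"), ("amenity", "dentist"), ("amenity", "doctors"), ("amenity", "pharmacy"), ("amenity", "veterinary"), ("amenity", "police"), ("amenity", "post_office"), ("building", "office"), ("office", "*")] from by decide]
  rw [PySem.Dict.get?_eq_some_iff_mem_items _ _ _ pvExact_nodup,
      PySem.Dict.get?_eq_some_iff_mem_items _ _ _ pvWild_nodup, pvExact_items, pvWild_items]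
  simp [pvTagMatch, Prod.ext_iff]
  constructor
  · rintro ⟨kx, vx, (⟨rfl,rfl⟩|⟨rfl,rfl⟩|⟨rfl,rfl⟩|⟨rfl,rfl⟩|⟨rfl,rfl⟩|⟨rfl,rfl⟩|⟨rfl,rfl⟩|⟨rfl,rfl⟩|⟨rfl,rfl⟩|⟨rfl,rfl⟩), hm⟩ <;> (try simp at hm) <;> tauto
  · rintro ((⟨h1,h2⟩|⟨h1,h2⟩|⟨h1,h2⟩|⟨h1,h2⟩|⟨h1,h2⟩|⟨h1,h2⟩|⟨h1,h2⟩|⟨h1,h2⟩|⟨h1,h2⟩)|hk)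
    exacts [⟨"amenity", "bank", by simp, by simp [h1, h2]⟩, ⟨"amenity", "clinic", by simp, by simp [h1, h2]⟩, ⟨"amenity", "dentist", by simp, by simp [h1, h2]⟩, ⟨"amenity", "doctors", by simp, by simp [h1, h2]⟩, ⟨"amenity", "pharmacy", by simp, by simp [h1, h2]⟩, ⟨"amenity", "veterinary", by simp, by simp [h1, h2]⟩, ⟨"amenity", "police", by simp, by simp [h1, h2]⟩, ⟨"amenity", "post_office", by simp, by simp [h1, h2]⟩, ⟨"building", "office", by simp, by simp [h1, h2]⟩, ⟨"office", "*", by simp, by simp [hk]⟩]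

lemma pvHit_iff (tags : List (List (String × String))) :
    ∀ pp ∈ pvSortedPlaces, (pvHitA pp.2 tags = true ↔ pp.1 ∈ pvCands tags) := by
  intro pp hpp
  have hswap : pvHitA pp.2 tags = true ↔ ∃ tag ∈ tags, ∃ t ∈ pp.2, pvTagMatch (pvParse t) tag = true := by
    simp only [pvHitA, List.any_eq_true]
    tauto
  rw [hswap, pvCands_mem_iff]
  simp only [pvSortedPlaces, List.mem_cons, List.not_mem_nil, or_false] at hpp
  rcases hpp with rfl | rfl | rfl | rfl | rfl | rfl <;>
    exact exists_congr (fun tag => and_congr_right (fun _ => by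
      first
      | exact pvPerTag_super tag
      | exact pvPerTag_store tag
      | exact pvPerTag_sport tag
      | exact pvPerTag_school tag
      | exact pvPerTag_restaurant tag
      | exact pvPerTag_office tag))

-- ===== VERDICT (by name: the statement is the Claim_ definition above) =====
theorem processTagsAgainstPlaces_spec : Claim_equal_processTagsAgainstPlaces := by
  intro tags _
  show processTagsAgainstPlaces tags = processTagsAgainstPlaces_alt tags
  rw [processTagsAgainstPlaces, pvSorted_eval, pvAlt_eq]
  exact pvLoop_eq_max tags pvSortedPlaces
    (by simp [pvSortedPlaces, List.pairwise_cons, String.lt_iff_toList_lt]; decide)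
    (pvCands tags) (fun x hx => pvCands_mem tags x hx) (pvHit_iff tags)
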